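-- pv_equiv track=rewrite | github.com/inindev/picotool_py | _binary_info.py | _decode_pins_with_func
-- ===== SOURCE A (Python) =====
-- BI_PINS_ENCODING_RANGE = 1
--
-- BI_PINS_ENCODING_MULTI = 2
--
-- def _decode_pins_with_func(encoding, is_64bit=False):
--     """Decode a PINS_WITH_FUNC or PINS64_WITH_FUNC encoding into
--     (pin_mask, function_number).
--
--     Mirrors do_pins_func in main.cpp:2510-2544.
--
--     Returns (mask, func) where mask is a bitmask of GPIO pin numbers
--     and func is the function select index into the pin_functions table.
--     """
--     enc_type = encoding & 0x7          # bits [2:0]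
--
--     if is_64bit:
--         bpp, pm, fp = 8, 0xFF, 8      # 64-bit: 8 bits/pin, mask 0xFF, first pin at bit 8
--         func = (encoding >> 3) & 0x1F  # 5-bit function
--         max_pins = 7
--     else:
--         bpp, pm, fp = 5, 0x1F, 7      # 32-bit: 5 bits/pin, mask 0x1F, first pin at bit 7
--         func = (encoding >> 3) & 0xF   # 4-bit function
--         max_pins = 5
--
--     mask = 0
--     if enc_type == BI_PINS_ENCODING_RANGE:
--         plo = (encoding >> fp) & pm
--         phi = (encoding >> (fp + bpp)) & pm
--         for i in range(plo, phi + 1):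
--             mask |= 1 << i
--
--     elif enc_type == BI_PINS_ENCODING_MULTI:
--         last = -1
--         work = encoding >> fp
--         for _ in range(max_pins):
--             cur = work & pm
--             mask |= 1 << cur
--             if cur == last:
--                 break
--             last = cur
--             work >>= bpp
--
--     return mask, func
-- ===== SOURCE B (Python) =====
-- BI_PINS_ENCODING_RANGE = 1
--
-- BI_PINS_ENCODING_MULTI = 2
--
-- def _decode_pins_with_func(encoding, is_64bit=False):
--     """Closed-form re-implementation: contiguous bitmask by arithmetic for the
--     RANGE encoding; field-list extraction plus prefix OR for the MULTI encoding."""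
--     if is_64bit:
--         bpp, pm, fp = 8, 0xFF, 8
--         func = (encoding >> 3) & 0x1F
--         max_pins = 7
--     else:
--         bpp, pm, fp = 5, 0x1F, 7
--         func = (encoding >> 3) & 0xF
--         max_pins = 5
--
--     enc_type = encoding & 0x7
--     mask = 0
--     if enc_type == BI_PINS_ENCODING_RANGE:
--         plo = (encoding >> fp) & pm
--         phi = (encoding >> (fp + bpp)) & pm
--         mask = ((1 << (phi + 1)) - (1 << plo)) if plo <= phi else 0
--     elif enc_type == BI_PINS_ENCODING_MULTI:
--         pins = [(encoding >> (fp + k * bpp)) & pm for k in range(max_pins)]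
--         n = next((i + 1 for i in range(1, max_pins) if pins[i] == pins[i - 1]), max_pins)
--         for p in pins[:n]:
--             mask |= 1 << p
--     return mask, func
-- ===== Notes on version B (the rewrite author's own statement) =====
-- stated objective: simpler
-- what changed: The RANGE branch's per-bit loop is replaced by a closed-form contiguous bitmask (2^(phi+1) - 2^plo when plo <= phi, else 0), and the MULTI branch's stateful scan with break is replaced by extracting the pin fields with a comprehension, truncating at the first adjacent duplicate, and OR-ing the kept prefix.
import Mathlib
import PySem

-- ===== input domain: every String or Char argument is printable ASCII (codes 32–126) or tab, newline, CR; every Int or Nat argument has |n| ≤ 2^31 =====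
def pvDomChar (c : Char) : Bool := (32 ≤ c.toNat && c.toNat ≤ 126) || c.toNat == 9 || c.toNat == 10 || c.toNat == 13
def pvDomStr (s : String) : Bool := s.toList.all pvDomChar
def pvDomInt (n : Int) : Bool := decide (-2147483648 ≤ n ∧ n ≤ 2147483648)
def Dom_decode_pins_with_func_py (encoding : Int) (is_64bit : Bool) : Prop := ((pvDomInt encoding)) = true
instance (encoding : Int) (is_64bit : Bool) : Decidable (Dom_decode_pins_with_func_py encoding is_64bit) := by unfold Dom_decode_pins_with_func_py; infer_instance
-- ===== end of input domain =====

-- B replaces A's RANGE bit-setting loop by a closed-form contiguous bitmask and A's MULTI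
-- stateful scan by field extraction, adjacent-duplicate truncation and a prefix OR (objective: simpler).

-- ===== PORT A =====
-- the MULTI loop of A: 'for _ in range(max_pins): cur = work & pm; mask |= 1 << cur;
-- if cur == last: break; last = cur; work >>= bpp'.  cur is always ≥ 0 (it is masked
-- with pm ≥ 0), so Python's '1 << cur' is exactly '1 <<< cur.toNat'.
def pvMultiA (pm : Int) (bpp : Nat) : Nat → Int → Int → Int → Int
  | 0, mask, _, _ => mask
  | n + 1, mask, last, work =>
    let cur := PySem.Int.band work pm
    let mask' := PySem.Int.bor mask (1 <<< cur.toNat)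
    if cur == last then mask'
    else pvMultiA pm bpp n mask' cur (work >>> bpp)

def decode_pins_with_func_py (encoding : Int) (is_64bit : Bool) : Int × Int :=
  let enc_type := PySem.Int.band encoding 0x7
  let bpp : Nat := if is_64bit then 8 else 5
  let pm : Int := if is_64bit then 0xFF else 0x1F
  let fp : Nat := if is_64bit then 8 else 7
  let func := if is_64bit then PySem.Int.band (encoding >>> 3) 0x1F
              else PySem.Int.band (encoding >>> 3) 0xF
  let max_pins : Nat := if is_64bit then 7 else 5
  let mask : Int :=
    if enc_type == 1 then
      let plo := PySem.Int.band (encoding >>> fp) pm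
      let phi := PySem.Int.band (encoding >>> (fp + bpp)) pm
      -- every i in the range satisfies i ≥ plo ≥ 0, so '1 << i' is '1 <<< i.toNat' exactly
      (PySem.List.pyRange plo (phi + 1) 1).foldl (fun m i => PySem.Int.bor m (1 <<< i.toNat)) 0
    else if enc_type == 2 then
      pvMultiA pm bpp max_pins 0 (-1) (encoding >>> fp)
    else 0
  (mask, func)

-- ===== PORT B =====
-- the truncation loop of B: 'for prev, cur in zip(pins, pins[1:]): keep.append(cur);
-- if cur == prev: break' — structural recursion over the tail carrying the previous element.
def pvKeep (prev : Int) : List Int → List Int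
  | [] => []
  | c :: cs => c :: (if c == prev then [] else pvKeep c cs)

def decode_pins_with_func_py_alt (encoding : Int) (is_64bit : Bool) : Int × Int :=
  let bpp : Nat := if is_64bit then 8 else 5
  let pm : Int := if is_64bit then 0xFF else 0x1F
  let fp : Nat := if is_64bit then 8 else 7
  let func := if is_64bit then PySem.Int.band (encoding >>> 3) 0x1F
              else PySem.Int.band (encoding >>> 3) 0xF
  let max_pins : Nat := if is_64bit then 7 else 5
  let enc_type := PySem.Int.band encoding 0x7
  let mask : Int :=
    if enc_type == 1 then
      let plo := PySem.Int.band (encoding >>> fp) pm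
      let phi := PySem.Int.band (encoding >>> (fp + bpp)) pm
      -- plo, phi ≥ 0, so '1 << (phi+1)' and '1 << plo' are exact with .toNat exponents
      if plo ≤ phi then ((1 <<< (phi + 1).toNat) - (1 <<< plo.toNat) : Int) else 0
    else if enc_type == 2 then
      let pins := (List.range max_pins).map
        (fun k => PySem.Int.band (encoding >>> (fp + k * bpp)) pm)
      -- 'keep = pins[:1]' followed by the zip loop (pvKeep); pins is never empty
      let keep := match pins with
        | [] => []
        | p :: rest => p :: pvKeep p rest
      keep.foldl (fun m p => PySem.Int.bor m (1 <<< p.toNat)) 0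
    else 0
  (mask, func)

-- ===== PRECONDITION & SPEC =====
def Spec_decode_pins_with_func_py (encoding : Int) (is_64bit : Bool) (out : Int × Int) : Prop := out = decode_pins_with_func_py_alt encoding is_64bit
instance (encoding : Int) (is_64bit : Bool) (out : Int × Int) : Decidable (Spec_decode_pins_with_func_py encoding is_64bit out) := by unfold Spec_decode_pins_with_func_py; infer_instance

-- ===== CLAIM (what is proved, stated in full; the proofs are below) =====
def Claim_equal_decode_pins_with_func_py : Prop := ∀ (encoding : Int) (is_64bit : Bool), Dom_decode_pins_with_func_py encoding is_64bit → Spec_decode_pins_with_func_py encoding is_64bit (decode_pins_with_func_py encoding is_64bit)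

-- ===== LEMMAS AND PROOFS =====

theorem pv_lor_two_pow (m k : Nat) (h : m < 2 ^ k) : m ||| 2 ^ k = m + 2 ^ k := by
  apply Nat.eq_of_testBit_eq
  intro j
  rw [show m + 2 ^ k = 2 ^ k * 1 + m by ring, Nat.testBit_two_pow_mul_add 1 h j]
  by_cases hj : j < k
  · simp [Nat.testBit_two_pow_of_ne (by omega : k ≠ j), hj]
  · have hm : m.testBit j = false :=
      Nat.testBit_lt_two_pow (lt_of_lt_of_le h (Nat.pow_le_pow_right (by norm_num) (by omega)))
    by_cases hjk : j = k
    · subst hjk; simp [hm]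
    · have h1 : Nat.testBit 1 (j - k) = false := by
        rw [show (1 : Nat) = 2 ^ 0 from rfl]
        exact Nat.testBit_two_pow_of_ne (by omega)
      simp [hm, hj, h1, Nat.testBit_two_pow_of_ne (by omega : k ≠ j)]

theorem pv_shl (k : Nat) : (1 <<< k : Nat) = 2 ^ k := Nat.one_shiftLeft k

theorem pv_bor_pow (acc : Int) (k : Nat) (h0 : 0 ≤ acc) (h : acc < 1 <<< k) :
    PySem.Int.bor acc (1 <<< k) = acc + 1 <<< k := by
  simp only [pv_shl] at h ⊢
  obtain ⟨a, rfl⟩ := Int.eq_ofNat_of_zero_le h0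
  rw [PySem.Int.bor_natCast, pv_lor_two_pow a k (by exact_mod_cast h)]
  push_cast; ring

theorem pv_shl_pos (k : Nat) : (0 : Int) < 1 <<< k := by
  simp only [pv_shl]
  positivity

-- A's RANGE loop computed with an explicit accumulator
theorem pv_range_fold (n : Nat) : ∀ (a acc : Int), 0 ≤ a → 0 ≤ acc → acc < 1 <<< a.toNat →
    (PySem.List.pyRange a (a + n) 1).foldl (fun m i => PySem.Int.bor m (1 <<< i.toNat)) acc
      = acc + (1 <<< (a.toNat + n)) - (1 <<< a.toNat) := by
  induction n with
  | zero =>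
    intro a acc _ _ _
    norm_num [PySem.List.pyRange_one]
  | succ n ih =>
    intro a acc ha hacc hlt
    rw [PySem.List.pyRange_one_cons (by omega : a < a + ((n : Nat) + 1 : Nat))]
    simp only [List.foldl_cons]
    rw [pv_bor_pow acc a.toNat hacc hlt]
    have e1 : (a + 1).toNat = a.toNat + 1 := by omega
    have hstep : a + ((n + 1 : Nat) : Int) = (a + 1) + (n : Nat) := by push_cast; ring
    rw [hstep, ih (a + 1) _ (by omega) (by positivity)
      (by
        rw [e1]
        simp only [pv_shl] at hlt ⊢
        have h2 : (2 : Nat) ^ (a.toNat + 1) = 2 * 2 ^ a.toNat := by rw [pow_succ]; ring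
        omega)]
    rw [e1]
    simp only [pv_shl]
    push_cast
    rw [show a.toNat + 1 + n = a.toNat + (n + 1) from by omega]
    rw [show a.toNat + (n + 1) = (a.toNat + n) + 1 from by omega]
    rw [pow_succ, pow_succ]
    ring

-- A's RANGE branch equals B's closed form
theorem pv_range_eq (plo phi : Int) (hlo : 0 ≤ plo) :
    (PySem.List.pyRange plo (phi + 1) 1).foldl (fun m i => PySem.Int.bor m (1 <<< i.toNat)) 0
      = if plo ≤ phi then ((1 <<< (phi + 1).toNat) - (1 <<< plo.toNat) : Int) else 0 := by
  by_cases hle : plo ≤ phi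
  · rw [if_pos hle]
    have hn : phi + 1 = plo + ((((phi + 1 - plo).toNat : Nat) : Int)) := by omega
    rw [show PySem.List.pyRange plo (phi + 1) 1
          = PySem.List.pyRange plo (plo + (((phi + 1 - plo).toNat : Nat) : Int)) 1 from by
        rw [← hn]]
    rw [pv_range_fold _ plo 0 hlo le_rfl (pv_shl_pos _)]
    have ht : plo.toNat + (phi + 1 - plo).toNat = (phi + 1).toNat := by omega
    rw [ht]; ring
  · rw [if_neg hle]
    have he : PySem.List.pyRange plo (phi + 1) 1 = [] := by
      simp [PySem.List.pyRange_one, (by omega : (phi + 1 - plo).toNat = 0)]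
    rw [he]
    norm_num

-- A's MULTI recursion is the fold of the pvKeep-truncated field list
theorem pv_multi_fold (pm : Int) (bpp : Nat) (n : Nat) :
    ∀ (mask last work : Int),
    pvMultiA pm bpp n mask last work
      = (pvKeep last ((List.range n).map (fun k => PySem.Int.band (work >>> (k * bpp)) pm))).foldl
          (fun m p => PySem.Int.bor m (1 <<< p.toNat)) mask := by
  induction n with
  | zero => intro mask last work; simp [pvMultiA, pvKeep]
  | succ n ih =>
    intro mask last work
    have hlist : (List.range (n + 1)).map (fun k => PySem.Int.band (work >>> (k * bpp)) pm)
        = PySem.Int.band work pm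
            :: (List.range n).map (fun k => PySem.Int.band ((work >>> bpp) >>> (k * bpp)) pm) := by
      rw [List.range_succ_eq_map]
      simp only [List.map_cons, List.map_map, Nat.zero_mul]
      congr 1
      · norm_num
      · apply List.map_congr_left
        intro k _
        simp only [Function.comp, Nat.succ_eq_add_one]
        rw [show (k + 1) * bpp = bpp + k * bpp from by ring, Int.shiftRight_add]
    rw [hlist, pvKeep]
    by_cases hc : PySem.Int.band work pm == last
    · simp only [pvMultiA, hc, if_pos, List.foldl_cons, List.foldl_nil]
    · simp only [pvMultiA, hc, Bool.false_eq_true, List.foldl_cons]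
      exact ih _ _ _

theorem pv_band_nonneg (x pm : Int) (hpm : 0 ≤ pm) : 0 ≤ PySem.Int.band x pm := by
  rw [PySem.Int.band_comm]
  exact PySem.Int.band_nonneg_of_nonneg_left _ hpm

-- A's MULTI branch equals B's extract-truncate-fold
theorem pv_multi_eq (e pm : Int) (hpm : 0 ≤ pm) (bpp fp mp : Nat) :
    pvMultiA pm bpp mp 0 (-1) (e >>> fp)
      = (match (List.range mp).map (fun k => PySem.Int.band (e >>> (fp + k * bpp)) pm) with
         | [] => ([] : List Int)
         | p :: rest => p :: pvKeep p rest).foldl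
          (fun (m p : Int) => PySem.Int.bor m (1 <<< p.toNat)) 0 := by
  rw [pv_multi_fold]
  have hl : (List.range mp).map (fun k => PySem.Int.band ((e >>> fp) >>> (k * bpp)) pm)
      = (List.range mp).map (fun k => PySem.Int.band (e >>> (fp + k * bpp)) pm) := by
    apply List.map_congr_left
    intro k _
    rw [Int.shiftRight_add]
  rw [hl]
  have hmem : ∀ p ∈ (List.range mp).map (fun k => PySem.Int.band (e >>> (fp + k * bpp)) pm),
      0 ≤ p := by
    intro p hp
    simp only [List.mem_map] at hp
    obtain ⟨k, _, rfl⟩ := hp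
    exact pv_band_nonneg _ _ hpm
  generalize hL : (List.range mp).map (fun k => PySem.Int.band (e >>> (fp + k * bpp)) pm) = L
  rw [hL] at hmem
  cases L with
  | nil => rfl
  | cons p rest =>
    have hp : (p == (-1 : Int)) = false := by
      have := hmem p (by simp)
      simp
      omega
    rw [pvKeep, hp]
    simp

theorem pv_ports_eq (encoding : Int) (is_64bit : Bool) :
    decode_pins_with_func_py encoding is_64bit = decode_pins_with_func_py_alt encoding is_64bit := by
  cases is_64bit <;>
    ( simp only [decode_pins_with_func_py, decode_pins_with_func_py_alt, if_true, if_false,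
        Bool.false_eq_true, Prod.mk.injEq, and_true]
      by_cases h1 : (PySem.Int.band encoding 7 == 1) = true
      · rw [if_pos h1, if_pos h1]
        exact pv_range_eq _ _ (pv_band_nonneg _ _ (by norm_num))
      · rw [if_neg h1, if_neg h1]
        by_cases h2 : (PySem.Int.band encoding 7 == 2) = true
        · rw [if_pos h2, if_pos h2]
          exact pv_multi_eq _ _ (by norm_num) _ _ _
        · rw [if_neg h2, if_neg h2] )

-- ===== VERDICT (by name: the statement is the Claim_ definition above) =====
theorem decode_pins_with_func_py_spec : Claim_equal_decode_pins_with_func_py := by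
  intro encoding is_64bit _
  show decode_pins_with_func_py encoding is_64bit = decode_pins_with_func_py_alt encoding is_64bit
  exact pv_ports_eq encoding is_64bit
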